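-- pv_equiv track=rewrite | github.com/Charlot-DEDJINOU/Best-Flag | cryptographie/offset.py | crypting
-- ===== SOURCE A (Python) =====
-- def crypting(s, key):
--     if len(s) > key and key > 0:
--         res = [""] * len(s)
--
--         for i in range(len(s)):
--             index = i
--             for _ in range(key):
--                 index += 1
--                 if index > len(s) - 1:
--                     index = 0
--             nextPlace = index
--             res[nextPlace] = s[i]
--
--         return ''.join(res)
--     else:
--         return s
-- ===== SOURCE B (Python) =====
-- def crypting(s, key):
--     n = len(s)
--     if n > key and key > 0:
--         return ''.join(s[(j - key) % n] for j in range(n))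
--     return s
-- ===== Notes on version B (the rewrite author's own statement) =====
-- stated objective: faster
-- what changed: A scatters each source char by simulating key single-step wraps (an O(key) inner loop per char); B builds the output in one pass, gathering position j directly from s[(j - key) % n].
import Mathlib
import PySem

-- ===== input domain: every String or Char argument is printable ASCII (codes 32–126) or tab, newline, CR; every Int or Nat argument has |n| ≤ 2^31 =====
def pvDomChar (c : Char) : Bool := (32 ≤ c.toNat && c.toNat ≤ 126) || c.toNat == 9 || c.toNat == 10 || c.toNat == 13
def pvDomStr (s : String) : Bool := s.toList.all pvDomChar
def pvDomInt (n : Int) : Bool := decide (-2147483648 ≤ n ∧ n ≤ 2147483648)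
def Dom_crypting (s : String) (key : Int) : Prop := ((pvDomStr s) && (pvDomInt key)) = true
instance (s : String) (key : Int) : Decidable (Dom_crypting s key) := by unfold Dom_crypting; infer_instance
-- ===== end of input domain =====

-- B replaces A's O(key)-per-character scatter loop with a one-pass gather via (j - key) % n; faster (asymptotic).

-- ===== PORT A =====
-- A: if len(s) > key > 0, scatter each s[i] to the index reached from i by `key` single +1-with-wrap steps.
def crypting (s : String) (key : Int) : String :=
  let cs := s.toList
  if ((cs.length : Int) > key ∧ key > 0) then
    let n : Int := (cs.length : Int)
    let res0 : List (List Char) := List.replicate cs.length []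
    let res := (PySem.List.pyRange 0 n 1).foldl (fun res i =>
      let index := (PySem.List.pyRange 0 key 1).foldl (fun index _ =>
        let index := index + 1
        if index > n - 1 then (0 : Int) else index) i
      let nextPlace := index
      PySem.List.pySetD res nextPlace [PySem.List.pyGetD cs i ' ']) res0
    String.ofList (PySem.Chars.join [] res)
  else s

-- ===== PORT B =====
-- B: same guard; output position j takes s[(j - key) % n], built in a single pass.
def crypting_alt (s : String) (key : Int) : String :=
  let cs := s.toList
  let n : Int := (cs.length : Int)
  if (n > key ∧ key > 0) then
    String.ofList ((PySem.List.pyRange 0 n 1).map (fun j =>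
      PySem.List.pyGetD cs (PySem.Int.mod (j - key) n) ' '))
  else s

-- ===== PRECONDITION & SPEC =====
def Spec_crypting (s : String) (key : Int) (out : String) : Prop := out = crypting_alt s key
instance (s : String) (key : Int) (out : String) : Decidable (Spec_crypting s key out) := by unfold Spec_crypting; infer_instance

-- ===== CLAIM (what is proved, stated in full; the proofs are below) =====
def Claim_equal_crypting : Prop := ∀ (s : String) (key : Int), Dom_crypting s key → Spec_crypting s key (crypting s key)

-- ===== LEMMAS AND PROOFS =====

-- 0 ≤ a < n and 0 ≤ m < n: position a is the wrap-target of source m iff m is the gather-source of a.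
theorem pv_mod_src_tgt {n key a m : Int} (ha0 : 0 ≤ a) (ha : a < n)
    (hm0 : 0 ≤ m) (hm : m < n) : (a = (m + key) % n) ↔ ((a - key) % n = m) := by
  rw [show (a = (m + key) % n) ↔ (a % n = (m + key) % n) by rw [Int.emod_eq_of_lt ha0 ha],
      show ((a - key) % n = m) ↔ ((a - key) % n = m % n) by rw [Int.emod_eq_of_lt hm0 hm],
      Int.emod_eq_emod_iff_emod_sub_eq_zero, Int.emod_eq_emod_iff_emod_sub_eq_zero,
      show a - (m + key) = a - key - m by ring]

-- one +1-with-wrap step, iterated m times from i, is (i + m) % n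
theorem pv_iter_step (n : Int) (hn1 : 1 < n) :
    ∀ (m : Nat) (i : Int), 0 ≤ i → i < n →
      (fun index => if index + 1 > n - 1 then (0 : Int) else index + 1)^[m] i
        = (i + m) % n := by
  intro m
  induction m with
  | zero => intro i h0 h1; simp [Int.emod_eq_of_lt h0 h1]
  | succ m ih =>
    intro i h0 h1
    rw [Function.iterate_succ_apply]
    have hstep : (if i + 1 > n - 1 then (0 : Int) else i + 1) = (i + 1) % n := by
      by_cases h : i + 1 > n - 1
      · have hieq : i + 1 = n := by omega
        rw [if_pos h, hieq, Int.emod_self]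
      · rw [if_neg h]
        exact (Int.emod_eq_of_lt (by omega) (by omega)).symm
    show (fun index => if index + 1 > n - 1 then (0 : Int) else index + 1)^[m]
        (if i + 1 > n - 1 then (0 : Int) else i + 1) = _
    rw [hstep, ih ((i + 1) % n) (Int.emod_nonneg _ (by omega)) (Int.emod_lt_of_pos _ (by omega))]
    rw [Int.emod_add_emod]
    congr 1; push_cast; ring

-- the inner for-loop of A computes (i + key) % n
theorem pv_inner_loop (n key i : Int) (hk : 0 < key) (hkn : key < n) (h0 : 0 ≤ i) (h1 : i < n) :
    (PySem.List.pyRange 0 key 1).foldl (fun index _ =>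
        if index + 1 > n - 1 then (0 : Int) else index + 1) i = (i + key) % n := by
  rw [List.foldl_const, PySem.List.length_pyRange_one]
  rw [pv_iter_step n (by omega) _ i h0 h1]
  congr 2; omega

-- the outer loop up to m fills exactly the targets of sources 0..m-1
theorem pv_outer_loop (cs : List Char) (key : Int) (hk : 0 < key) (hkn : key < (cs.length : Int)) :
    ∀ (m : Nat), m ≤ cs.length →
      (PySem.List.pyRange 0 (m : Int) 1).foldl
          (fun res i => PySem.List.pySetD res ((i + key) % (cs.length : Int)) [PySem.List.pyGetD cs i ' '])
          (List.replicate cs.length []) =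
        (PySem.List.pyRange 0 (cs.length : Int) 1).map (fun j =>
          if (j - key) % (cs.length : Int) < (m : Int)
          then [PySem.List.pyGetD cs ((j - key) % (cs.length : Int)) ' '] else []) := by
  have hn : 0 < (cs.length : Int) := by omega
  intro m
  induction m with
  | zero =>
    intro _
    rw [show ((0 : Nat) : Int) = 0 by rfl, PySem.List.pyRange_one_eq_nil (le_refl 0), List.foldl_nil]
    apply List.ext_getElem
    · simp [PySem.List.length_pyRange_one]
    · intro j hj hj'
      rw [List.getElem_replicate, List.getElem_map,
          if_neg (not_lt.mpr (Int.emod_nonneg _ (by omega : (cs.length : Int) ≠ 0)))]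
  | succ m ih =>
    intro hm
    have hm' : m ≤ cs.length := by omega
    rw [show ((m + 1 : Nat) : Int) = (m : Int) + 1 by push_cast; ring,
        PySem.List.pyRange_one_succ_right (by omega), List.foldl_append, ih hm', List.foldl_cons,
        List.foldl_nil]
    set n : Int := (cs.length : Int) with hn_def
    have ht0 : 0 ≤ ((m : Int) + key) % n := Int.emod_nonneg _ (by omega)
    have ht1 : ((m : Int) + key) % n < n := Int.emod_lt_of_pos _ hn
    rw [PySem.List.pySetD_of_nonneg _ _ ht0]
    apply List.ext_getElem
    · simp [PySem.List.length_pyRange_one]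
    · intro j hj hj'
      have hjn : j < cs.length := by
        have h2 := hj'
        simp only [List.length_map, PySem.List.length_pyRange_one] at h2
        omega
      rw [List.getElem_set, List.getElem_map, List.getElem_map,
          PySem.List.getElem_pyRange_one]
      have hsrc : ((0 : Int) + (j : Int) = ((m : Int) + key) % n) ↔ (((0 : Int) + (j : Int) - key) % n = (m : Int)) :=
        pv_mod_src_tgt (by omega) (by simp; omega) (by omega) (by omega)
      by_cases he : (((m : Int) + key) % n).toNat = j
      · have hj_eq : (0 : Int) + (j : Int) = ((m : Int) + key) % n := by omega
        have hsrc_eq := hsrc.mp hj_eq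
        simp only [if_pos he, hsrc_eq]
        rw [if_pos (by omega)]
      · have hj_ne : ¬ ((0 : Int) + (j : Int) = ((m : Int) + key) % n) := by omega
        have hsrc_ne : ¬ (((0 : Int) + (j : Int) - key) % n = (m : Int)) := fun h => hj_ne (hsrc.mpr h)
        simp only [if_neg he]
        by_cases hlt : ((0 : Int) + (j : Int) - key) % n < (m : Int)
        · rw [if_pos hlt, if_pos (by omega)]
        · rw [if_neg hlt, if_neg (by omega)]

-- ===== VERDICT (by name: the statement is the Claim_ definition above) =====
theorem crypting_spec : Claim_equal_crypting := by
  intro s key _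
  unfold Spec_crypting
  show crypting s key = crypting_alt s key
  simp only [crypting, crypting_alt]
  by_cases hc : ((s.toList.length : Int) > key ∧ key > 0)
  · rw [if_pos hc, if_pos hc]
    obtain ⟨hkn, hk⟩ := hc
    have hcong : (PySem.List.pyRange 0 (s.toList.length : Int) 1).foldl
        (fun res i => PySem.List.pySetD res
          ((PySem.List.pyRange 0 key 1).foldl (fun index _ =>
            if index + 1 > (s.toList.length : Int) - 1 then (0 : Int) else index + 1) i)
          [PySem.List.pyGetD s.toList i ' '])
        (List.replicate s.toList.length []) =
      (PySem.List.pyRange 0 (s.toList.length : Int) 1).foldl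
        (fun res i => PySem.List.pySetD res ((i + key) % (s.toList.length : Int))
          [PySem.List.pyGetD s.toList i ' '])
        (List.replicate s.toList.length []) := by
      apply PySem.List.foldl_congr_mem
      intro acc x hx
      have hx' := (PySem.List.mem_pyRange_one).mp hx
      rw [pv_inner_loop (s.toList.length : Int) key x hk hkn hx'.1 hx'.2]
    rw [hcong, pv_outer_loop s.toList key hk hkn s.toList.length (le_refl _)]
    have hfin : (PySem.List.pyRange 0 (s.toList.length : Int) 1).map (fun j =>
        if (j - key) % (s.toList.length : Int) < ((s.toList.length : Nat) : Int)
        then [PySem.List.pyGetD s.toList ((j - key) % (s.toList.length : Int)) ' '] else []) =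
      ((PySem.List.pyRange 0 (s.toList.length : Int) 1).map (fun j =>
        PySem.List.pyGetD s.toList (PySem.Int.mod (j - key) (s.toList.length : Int)) ' ')).map
        (fun c => [c]) := by
      rw [List.map_map]
      apply List.map_congr_left
      intro x hx
      rw [if_pos (Int.emod_lt_of_pos _ (by omega)), Function.comp_apply,
          PySem.Int.mod_eq_emod_of_pos (by omega)]
    rw [hfin, PySem.Chars.join_nil_singletons]
  · rw [if_neg hc, if_neg hc]
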